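-- pv_equiv track=rewrite | github.com/CiscoTestAutomation/genielibs | pkgs/clean-pkg/src/genie/libs/clean/stages/iosxr/stages.py | _getFileNameFromPath
-- ===== SOURCE A (Python) =====
-- def _getFileNameFromPath(str):
--     """ Internal Method to retrieve fileame from an XR path.
--     Work with the following format :
--         - <dir>:<image>
--         - <dir>:<special>/<folder>/<to>/<image_file>
--         - <dir>:<folder>/<image>
--
--     Returns:
--         tuple (dirname, filename)
--     """
--     delimiter = '/'
--     if str.find(delimiter) == -1:
--         delimiter = ':'
--     outList = str.split(delimiter)
--     dirname = ''
--     len(outList)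
--     for i in range(0, len(outList) - 1):
--         dirname += outList[i] + delimiter
--
--     filename = outList[-1]
--
--     return dirname, filename
-- ===== SOURCE B (Python) =====
-- def _getFileNameFromPath(str):
--     delimiter = '/'
--     if str.find(delimiter) == -1:
--         delimiter = ':'
--     head, sep, tail = str.rpartition(delimiter)
--     return head + sep, tail
-- ===== Notes on version B (the rewrite author's own statement) =====
-- stated objective: idiomatic
-- what changed: B keeps A's delimiter selection but replaces the split-into-list plus index-loop concatenation with a single str.rpartition call, returning (head+sep, tail) directly.
import Mathlib
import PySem

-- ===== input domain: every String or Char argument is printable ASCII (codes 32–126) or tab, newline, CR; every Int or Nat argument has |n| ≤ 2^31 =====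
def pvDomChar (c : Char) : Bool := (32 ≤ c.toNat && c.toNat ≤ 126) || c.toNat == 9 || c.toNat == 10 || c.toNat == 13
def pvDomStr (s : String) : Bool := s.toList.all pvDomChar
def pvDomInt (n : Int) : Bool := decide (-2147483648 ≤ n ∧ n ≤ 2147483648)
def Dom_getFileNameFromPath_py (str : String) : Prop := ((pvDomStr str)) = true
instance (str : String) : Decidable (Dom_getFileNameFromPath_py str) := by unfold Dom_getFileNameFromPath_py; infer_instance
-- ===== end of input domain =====

-- B replaces A's split-into-list + index-loop concatenation by a single rpartition
-- (head, sep, tail) at the last delimiter — more idiomatic, same O(n) cost.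


-- ===== PORT A =====
def getFileNameFromPath_py (str : String) : String × String :=
  let s := str.toList
  -- delimiter = '/'; if str.find(delimiter) == -1: delimiter = ':'
  let delimiter : List Char := if PySem.Chars.find s ['/'] = -1 then [':'] else ['/']
  let outList := PySem.Chars.splitOn s delimiter
  -- for i in range(0, len(outList) - 1): dirname += outList[i] + delimiter
  let dirname := (PySem.List.pyRange 0 ((outList.length : Int) - 1) 1).foldl
      (fun acc i => acc ++ (PySem.List.pyGetD outList i [] ++ delimiter)) []
  -- outList[-1]; str.split(sep) always yields a nonempty list, so Python never raises here
  let filename := PySem.List.pyGetD outList (-1) []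
  (String.mk dirname, String.mk filename)

-- ===== PORT B =====
-- hand port of str.rpartition(d) for a single-character separator (PySem has no rpartition):
-- none = separator absent; some (h, t) = text before / after the LAST occurrence of d (exact)
def pvRpart (d : Char) : List Char → Option (List Char × List Char)
  | [] => none
  | c :: rest =>
    match pvRpart d rest with
    | some (h, t) => some (c :: h, t)
    | none => if c = d then some ([], rest) else none

def getFileNameFromPath_py_alt (str : String) : String × String :=
  let s := str.toList
  let delimiter : Char := if PySem.Chars.find s ['/'] = -1 then ':' else '/'
  -- head, sep, tail = str.rpartition(delimiter); return head + sep, tail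
  match pvRpart delimiter s with
  | none => ("", String.mk s)
  | some (h, t) => (String.mk (h ++ [delimiter]), String.mk t)

-- ===== PRECONDITION & SPEC =====
def Spec_getFileNameFromPath_py (str : String) (out : String × String) : Prop := out = getFileNameFromPath_py_alt str
instance (str : String) (out : String × String) : Decidable (Spec_getFileNameFromPath_py str out) := by unfold Spec_getFileNameFromPath_py; infer_instance

-- ===== CLAIM (what is proved, stated in full; the proofs are below) =====
def Claim_equal_getFileNameFromPath_py : Prop := ∀ (str : String), Dom_getFileNameFromPath_py str → Spec_getFileNameFromPath_py str (getFileNameFromPath_py str)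

-- ===== LEMMAS AND PROOFS =====

-- structural characterisation of split on a single-character separator
def pvSplit (d : Char) : List Char → List (List Char)
  | [] => [[]]
  | c :: cs => if c = d then [] :: pvSplit d cs
               else (c :: (pvSplit d cs).headI) :: (pvSplit d cs).tail

theorem pvSplit_ne_nil (d : Char) (cs : List Char) : pvSplit d cs ≠ [] := by
  cases cs <;> simp [pvSplit] <;> split <;> simp

theorem splitOn_go_single (d : Char) : ∀ (l cur : List Char) (acc : List (List Char)) (fuel : Nat),
    l.length < fuel →
    PySem.Chars.splitOn.go [d] fuel l cur acc
      = acc.reverse ++ (pvSplit d l).modifyHead (cur.reverse ++ ·) := by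
  intro l
  induction l with
  | nil =>
    intro cur acc fuel hf
    cases fuel with
    | zero => omega
    | succ f => simp [PySem.Chars.splitOn.go, pvSplit]
  | cons c rest ih =>
    intro cur acc fuel hf
    cases fuel with
    | zero => simp at hf
    | succ f =>
      by_cases hc : c = d
      · subst hc
        have : [c].isPrefixOf (c :: rest) = true := by simp [List.isPrefixOf]
        simp only [PySem.Chars.splitOn.go, this, if_pos]
        rw [show List.drop [c].length (c :: rest) = rest from rfl]
        rw [ih [] (cur.reverse :: acc) f (by simpa using Nat.lt_of_succ_lt_succ hf)]
        simp [pvSplit]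
        cases pvSplit c rest <;> rfl
      · have : [d].isPrefixOf (c :: rest) = false := by
          simp [List.isPrefixOf]; exact fun h => (hc h.symm).elim
        simp only [PySem.Chars.splitOn.go, this]
        rw [ih (c :: cur) acc f (by simpa using Nat.lt_of_succ_lt_succ hf)]
        have hne := pvSplit_ne_nil d rest
        cases hsp : pvSplit d rest with
        | nil => exact (hne hsp).elim
        | cons p ps => simp [pvSplit, hc, hsp]

theorem splitOn_single (d : Char) (cs : List Char) :
    PySem.Chars.splitOn cs [d] = pvSplit d cs := by
  unfold PySem.Chars.splitOn
  rw [splitOn_go_single d cs [] [] (cs.length + 1) (by omega)]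
  cases hsp : pvSplit d cs with
  | nil => exact (pvSplit_ne_nil d cs hsp).elim
  | cons p ps => simp

-- A's index loop over range(0, len-1) is the flatMap of the parts except the last
theorem A_fold (d : Char) (parts : List (List Char)) (hne : parts ≠ []) :
    (PySem.List.pyRange 0 ((parts.length : Int) - 1) 1).foldl
        (fun acc i => acc ++ (PySem.List.pyGetD parts i [] ++ [d])) []
      = parts.dropLast.flatMap (fun p => p ++ [d]) := by
  have hlen : (parts.length : Int) - 1 = (parts.dropLast.length : Int) := by
    have : 1 ≤ parts.length := List.length_pos_iff.mpr hne
    simp [List.length_dropLast]; omega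
  rw [hlen]
  rw [PySem.List.foldl_congr_mem _ _
      (fun acc i => acc ++ (PySem.List.pyGetD parts.dropLast i [] ++ [d])) _ ?_]
  · rw [PySem.List.foldl_pyRange_zero_pyGetD' parts.dropLast []
        (fun acc p => acc ++ (p ++ [d])) []]
    simpa using PySem.List.foldl_append_eq_flatMap (fun p => p ++ [d]) parts.dropLast []
  · intro acc i hi
    rw [PySem.List.mem_pyRange_one] at hi
    have h1 : i < (parts.dropLast.length : Int) := hi.2
    show acc ++ (PySem.List.pyGetD parts i [] ++ [d])
        = acc ++ (PySem.List.pyGetD parts.dropLast i [] ++ [d])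
    rw [PySem.List.pyGetD_eq_getElem parts [] hi.1
        (by rw [List.length_dropLast] at h1; omega),
      PySem.List.pyGetD_eq_getElem parts.dropLast [] hi.1 h1,
      List.getElem_dropLast]

-- outList[-1] is the last part
theorem pyGetD_neg_one {α : Type} (xs : List α) (hne : xs ≠ []) (dflt : α) :
    PySem.List.pyGetD xs (-1) dflt = xs.getLastD dflt := by
  have hl : 1 ≤ xs.length := List.length_pos_iff.mpr hne
  simp only [PySem.List.pyGetD, PySem.List.pyGet?, PySem.List.pyIdx?]
  rw [if_neg (by omega), if_pos (by omega : -(xs.length : Int) ≤ -1)]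
  have h1 : xs.length - ((- (-1 : Int)).toNat) = xs.length - 1 := by norm_num
  rw [h1, Option.bind]
  rw [List.getElem?_eq_getElem (by omega)]
  simp [List.getLastD_eq_getLast?, List.getLast?_eq_getElem?,
    List.getElem?_eq_getElem (show xs.length - 1 < xs.length by omega)]

theorem pvRpart_eq_none_iff (d : Char) (cs : List Char) :
    pvRpart d cs = none ↔ d ∉ cs := by
  induction cs with
  | nil => simp [pvRpart]
  | cons c rest ih =>
    simp only [pvRpart]
    cases h : pvRpart d rest with
    | some p =>
      have hd : d ∈ rest := by
        by_contra hm
        have := ih.mpr hm; rw [h] at this; cases this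
      simp [List.mem_cons, hd]
    | none =>
      by_cases hc : c = d
      · simp [hc]
      · simp [hc, List.mem_cons, Ne.symm hc, ih.mp h]
theorem pvSplit_tail_nil_iff (d : Char) (cs : List Char) :
    (pvSplit d cs).tail = [] ↔ d ∉ cs := by
  induction cs with
  | nil => simp [pvSplit]
  | cons c rest ih =>
    by_cases hc : c = d
    · subst hc
      simp [pvSplit, pvSplit_ne_nil]
    · cases hsp : pvSplit d rest with
      | nil => exact (pvSplit_ne_nil d rest hsp).elim
      | cons p ps =>
        simp [pvSplit, hc, Ne.symm hc, ← ih, hsp]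
theorem pv_main (d : Char) (cs : List Char) :
    ((pvSplit d cs).dropLast.flatMap (fun p => p ++ [d]), (pvSplit d cs).getLastD [])
      = (match pvRpart d cs with
         | none => ([], cs)
         | some (h, t) => (h ++ [d], t)) := by
  induction cs with
  | nil => simp [pvSplit, pvRpart]
  | cons c rest ih =>
    have h1 := congrArg Prod.fst ih
    have h2 := congrArg Prod.snd ih
    simp only at h1 h2
    cases hsp : pvSplit d rest with
    | nil => exact (pvSplit_ne_nil d rest hsp).elim
    | cons p ps =>
      rw [hsp] at h1 h2
      by_cases hc : c = d
      · subst hc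
        have hs2 : pvSplit c (c :: rest) = [] :: p :: ps := by simp [pvSplit, hsp]
        cases hr : pvRpart c rest with
        | some pr =>
          obtain ⟨h, t⟩ := pr
          rw [hr] at h1 h2
          simp only at h1 h2
          have hr2 : pvRpart c (c :: rest) = some (c :: h, t) := by simp [pvRpart, hr]
          rw [hs2, hr2]
          rw [List.dropLast_cons_of_ne_nil (by simp), List.flatMap_cons]
          simp only [List.getLastD_eq_getLast?] at h2 ⊢
          simp [h1, h2]
        | none =>
          rw [hr] at h1 h2
          simp only at h1 h2
          have hr2 : pvRpart c (c :: rest) = some ([], rest) := by simp [pvRpart, hr]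
          rw [hs2, hr2]
          rw [List.dropLast_cons_of_ne_nil (by simp), List.flatMap_cons]
          simp only [List.getLastD_eq_getLast?] at h2 ⊢
          simp [h1, h2]
      · have hs2 : pvSplit d (c :: rest) = (c :: p) :: ps := by simp [pvSplit, hsp, hc]
        cases hr : pvRpart d rest with
        | some pr =>
          obtain ⟨h, t⟩ := pr
          rw [hr] at h1 h2
          simp only at h1 h2
          have hr2 : pvRpart d (c :: rest) = some (c :: h, t) := by simp [pvRpart, hr]
          have hmem : d ∈ rest := by
            by_contra hm
            have := (pvRpart_eq_none_iff d rest).mpr hm; rw [hr] at this; cases this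
          have hps : ps ≠ [] := by
            intro hps
            exact ((pvSplit_tail_nil_iff d rest).mp (by simp [hsp, hps])) hmem
          rw [hs2, hr2]
          cases ps with
          | nil => exact (hps rfl).elim
          | cons q qs =>
            rw [List.dropLast_cons_of_ne_nil (by simp), List.flatMap_cons] at h1 ⊢
            simp only [List.getLastD_eq_getLast?, List.getLast?_cons_cons] at h2 ⊢
            refine Prod.ext ?_ ?_
            · dsimp only
              have hcast := congrArg (fun l => c :: l) h1
              simpa using hcast
            
            · exact h2

        | none =>
          have hd : d ∉ rest := (pvRpart_eq_none_iff d rest).mp hr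
          have hps : ps = [] := by
            have := (pvSplit_tail_nil_iff d rest).mpr hd
            simpa [hsp] using this
          subst hps
          have hr2 : pvRpart d (c :: rest) = none := by simp [pvRpart, hr, hc]
          rw [hr] at h2
          simp only at h2
          have hp : p = rest := by simpa using h2
          rw [hs2, hr2]
          simp [hp]

theorem pv_core (d : Char) (cs : List Char) :
    (String.mk ((PySem.List.pyRange 0 (((PySem.Chars.splitOn cs [d]).length : Int) - 1) 1).foldl
        (fun acc i => acc ++ (PySem.List.pyGetD (PySem.Chars.splitOn cs [d]) i [] ++ [d])) []),
     String.mk (PySem.List.pyGetD (PySem.Chars.splitOn cs [d]) (-1) []))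
      = (match pvRpart d cs with
         | none => ("", String.mk cs)
         | some (h, t) => (String.mk (h ++ [d]), String.mk t)) := by
  rw [splitOn_single, A_fold d _ (pvSplit_ne_nil d cs),
    pyGetD_neg_one _ (pvSplit_ne_nil d cs)]
  have hm := pv_main d cs
  cases hr : pvRpart d cs with
  | none =>
    rw [hr] at hm
    have h1 := congrArg Prod.fst hm
    have h2 := congrArg Prod.snd hm
    simp only at h1 h2
    rw [h1, h2]
    rfl
  | some pr =>
    obtain ⟨h, t⟩ := pr
    rw [hr] at hm
    have h1 := congrArg Prod.fst hm
    have h2 := congrArg Prod.snd hm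
    simp only at h1 h2
    rw [h1, h2]

-- ===== VERDICT (by name: the statement is the Claim_ definition above) =====
theorem getFileNameFromPath_py_spec : Claim_equal_getFileNameFromPath_py := by
  intro str _
  unfold Spec_getFileNameFromPath_py getFileNameFromPath_py getFileNameFromPath_py_alt
  by_cases hf : PySem.Chars.find str.toList ['/'] = -1
  · simpa [hf] using pv_core ':' str.toList
  · simpa [hf] using pv_core '/' str.toList
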